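-- pv_equiv track=rewrite | github.com/SorayuthJapanya/ENGCE174 | LAB3/Pyramid Using Recurive Return/Filptriangle.py | pattern
-- ===== SOURCE A (Python) =====
-- def pattern(lenght):
--     if lenght == 0:
--         return ""
--     else:
--         result = pattern(lenght-1)
--         result += " " * lenght + "\n"
--         result += "* " * lenght + "\n"
--         return result
-- ===== SOURCE B (Python) =====
-- def pattern(lenght):
--     result = ""
--     for i in range(1, lenght + 1):
--         result += " " * i + "\n" + "* " * i + "\n"
--     return result
-- ===== Notes on version B (the rewrite author's own statement) =====
-- stated objective: idiomatic
-- what changed: Replaced the recursion (which unwinds from lenght down to 0 and rebuilds the string on the way back) by a single iterative loop accumulating the lines from 1 to lenght.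
import Mathlib
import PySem

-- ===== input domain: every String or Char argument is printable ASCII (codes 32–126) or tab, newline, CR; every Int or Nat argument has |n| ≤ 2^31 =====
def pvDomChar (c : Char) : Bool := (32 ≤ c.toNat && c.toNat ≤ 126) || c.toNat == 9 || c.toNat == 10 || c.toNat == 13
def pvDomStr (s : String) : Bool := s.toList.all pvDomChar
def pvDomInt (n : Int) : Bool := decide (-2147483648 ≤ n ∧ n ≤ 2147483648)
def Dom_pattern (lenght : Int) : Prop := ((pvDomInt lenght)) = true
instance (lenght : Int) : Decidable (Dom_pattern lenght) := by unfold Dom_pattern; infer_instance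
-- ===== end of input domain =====

-- B replaces A's recursion by an iterative loop over range(1, lenght+1); idiomatic, same cost.

-- ===== PORT A =====
-- A recurses on lenght down to 0; on the Int argument this is fuel-free only for
-- lenght ≥ 0 (Pre_), so the recursion is carried by lenght.toNat.
def patternRecA : Nat → List Char
  | 0 => []
  | n + 1 =>
      patternRecA n
        ++ PySem.List.pyRepeat [' '] ((n : Int) + 1) ++ ['\n']
        ++ PySem.List.pyRepeat ['*', ' '] ((n : Int) + 1) ++ ['\n']

def pattern (lenght : Int) : String := String.ofList (patternRecA lenght.toNat)

-- ===== PORT B =====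
def patternLineB (acc : List Char) (i : Int) : List Char :=
  acc ++ PySem.List.pyRepeat [' '] i ++ ['\n'] ++ PySem.List.pyRepeat ['*', ' '] i ++ ['\n']

def pattern_alt (lenght : Int) : String :=
  String.ofList ((PySem.List.pyRange 1 (lenght + 1) 1).foldl patternLineB [])

-- ===== PRECONDITION & SPEC =====
-- A never returns for lenght < 0 (infinite recursion / RecursionError), so Pre_ is 0 ≤ lenght.
def Pre_pattern (lenght : Int) : Prop := 0 ≤ lenght
instance (lenght : Int) : Decidable (Pre_pattern lenght) := by unfold Pre_pattern; infer_instance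
def pvWitness_pattern : Int := (3)

def Spec_pattern (lenght : Int) (out : String) : Prop := out = pattern_alt lenght
instance (lenght : Int) (out : String) : Decidable (Spec_pattern lenght out) := by unfold Spec_pattern; infer_instance

-- ===== CLAIM (what is proved, stated in full; the proofs are below) =====
def Claim_equal_pattern : Prop := ∀ (lenght : Int), Dom_pattern lenght → Pre_pattern lenght → Spec_pattern lenght (pattern lenght)

-- ===== LEMMAS AND PROOFS =====
theorem foldl_lines_eq (n : Nat) :
    (PySem.List.pyRange 1 ((n : Int) + 1) 1).foldl patternLineB [] = patternRecA n := by
  induction n with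
  | zero =>
      simp [PySem.List.pyRange_one_eq_nil, patternRecA]
  | succ k ih =>
      have h : PySem.List.pyRange 1 ((k : Int) + 1 + 1) 1
          = PySem.List.pyRange 1 ((k : Int) + 1) 1 ++ [(k : Int) + 1] :=
        PySem.List.pyRange_one_succ_right (by omega)
      rw [show ((k + 1 : Nat) : Int) + 1 = (k : Int) + 1 + 1 by push_cast; ring, h,
        List.foldl_append, ih]
      simp [patternRecA, patternLineB]

-- ===== VERDICT (by name: the statement is the Claim_ definition above) =====
theorem pattern_spec : Claim_equal_pattern := by
  intro l _ hpre
  unfold Spec_pattern pattern pattern_alt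
  have h : ((l.toNat : Int)) = l := Int.toNat_of_nonneg hpre
  rw [← h, foldl_lines_eq]
  rw [h]
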